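-- pv_equiv track=rewrite | github.com/nonameuserd/runform | src/akc/living/safe_recompile.py | _looks_sensitive_key
-- ===== SOURCE A (Python) =====
-- _SENSITIVE_KEY_MARKERS: frozenset[str] = frozenset(
--     {
--         "secret",
--         "secrets",
--         "token",
--         "password",
--         "passphrase",
--         "private_key",
--         "client_secret",
--         "api_key",
--         "apikey",
--         "access_key",
--         "secret_key",
--         "authorization",
--         "cookie",
--         "set_cookie",
--     }
-- )
--
-- def _looks_sensitive_key(key: str) -> bool:
--     k = "".join(ch for ch in str(key).strip().lower() if ch.isalnum() or ch in {"_", "-"})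
--     if not k:
--         return False
--     if k in _SENSITIVE_KEY_MARKERS:
--         return True
--     for marker in _SENSITIVE_KEY_MARKERS:
--         if (
--             k.endswith(f"_{marker}")
--             or k.endswith(f"-{marker}")
--             or k.startswith(f"{marker}_")
--             or k.startswith(f"{marker}-")
--         ):
--             return True
--     return False
-- ===== SOURCE B (Python) =====
-- _SENSITIVE_KEY_MARKERS: frozenset[str] = frozenset(
--     {
--         "secret",
--         "secrets",
--         "token",
--         "password",
--         "passphrase",
--         "private_key",
--         "client_secret",
--         "api_key",
--         "apikey",
--         "access_key",
--         "secret_key",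
--         "authorization",
--         "cookie",
--         "set_cookie",
--     }
-- )
--
--
-- def _looks_sensitive_key(key: str) -> bool:
--     k = "".join(ch for ch in str(key).strip().lower() if ch.isalnum() or ch in {"_", "-"})
--     if not k:
--         return False
--     if k in _SENSITIVE_KEY_MARKERS:
--         return True
--     # scan separator positions once, probing the marker set on both sides
--     for i in range(len(k)):
--         if k[i] in "_-" and (k[:i] in _SENSITIVE_KEY_MARKERS or k[i + 1:] in _SENSITIVE_KEY_MARKERS):
--             return True
--     return False
-- ===== Notes on version B (the rewrite author's own statement) =====
-- stated objective: alternative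
-- what changed: Instead of iterating the marker set and testing prefix/suffix strings per marker, B scans the normalized key's separator positions ('_'/'-') once and probes the marker set with the exact prefix k[:i] and suffix k[i+1:].
import Mathlib
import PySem

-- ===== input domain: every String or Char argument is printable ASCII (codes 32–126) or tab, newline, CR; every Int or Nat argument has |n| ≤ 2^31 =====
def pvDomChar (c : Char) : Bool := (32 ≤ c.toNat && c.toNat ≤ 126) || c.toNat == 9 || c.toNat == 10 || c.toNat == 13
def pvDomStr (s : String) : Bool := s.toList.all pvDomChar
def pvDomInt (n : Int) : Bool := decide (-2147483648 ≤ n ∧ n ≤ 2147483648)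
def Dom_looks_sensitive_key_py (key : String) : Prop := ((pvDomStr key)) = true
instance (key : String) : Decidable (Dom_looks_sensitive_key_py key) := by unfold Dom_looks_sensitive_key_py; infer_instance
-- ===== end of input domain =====

-- B replaces the per-marker prefix/suffix loop by a single scan over the key's separator
-- positions, probing the marker set with the exact prefix and suffix (objective: alternative).

-- the module constant _SENSITIVE_KEY_MARKERS (iteration order irrelevant: only `any`/membership are taken)
def pvMarkers : List (List Char) :=
  ["secret".toList, "secrets".toList, "token".toList, "password".toList, "passphrase".toList,
   "private_key".toList, "client_secret".toList, "api_key".toList, "apikey".toList,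
   "access_key".toList, "secret_key".toList, "authorization".toList, "cookie".toList,
   "set_cookie".toList]

-- the shared normalization line: "".join(ch for ch in str(key).strip().lower() if ch.isalnum() or ch in {"_","-"})
def pvNormalize (key : String) : List Char :=
  (PySem.Chars.lower (PySem.Chars.strip key.toList)).filter
    (fun ch => PySem.Chars.isalnum ch || ch == '_' || ch == '-')

-- ===== PORT A =====
def looks_sensitive_key_py (key : String) : Bool :=
  let k := pvNormalize key
  if k.isEmpty then false
  else if pvMarkers.contains k then true
  else pvMarkers.any (fun m =>
    PySem.Chars.endswith k ('_' :: m) || PySem.Chars.endswith k ('-' :: m) ||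
    PySem.Chars.startswith k (m ++ ['_']) || PySem.Chars.startswith k (m ++ ['-']))

-- ===== PORT B =====
def looks_sensitive_key_py_alt (key : String) : Bool :=
  let k := pvNormalize key
  if k.isEmpty then false
  else if pvMarkers.contains k then true
  else (List.range k.length).any (fun i =>
    (k[i]? == some '_' || k[i]? == some '-') &&
    (pvMarkers.contains (k.take i) || pvMarkers.contains (k.drop (i + 1))))

-- ===== PRECONDITION & SPEC =====
def Spec_looks_sensitive_key_py (key : String) (out : Bool) : Prop := out = looks_sensitive_key_py_alt key
instance (key : String) (out : Bool) : Decidable (Spec_looks_sensitive_key_py key out) := by unfold Spec_looks_sensitive_key_py; infer_instance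

-- ===== CLAIM (what is proved, stated in full; the proofs are below) =====
def Claim_equal_looks_sensitive_key_py : Prop := ∀ (key : String), Dom_looks_sensitive_key_py key → Spec_looks_sensitive_key_py key (looks_sensitive_key_py key)

-- ===== LEMMAS AND PROOFS =====

-- the per-marker affix loop equals the per-separator-index scan, for any key k
theorem pv_core (k : List Char) :
    (pvMarkers.any (fun m =>
      PySem.Chars.endswith k ('_' :: m) || PySem.Chars.endswith k ('-' :: m) ||
      PySem.Chars.startswith k (m ++ ['_']) || PySem.Chars.startswith k (m ++ ['-'])))
    = ((List.range k.length).any (fun i =>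
      (k[i]? == some '_' || k[i]? == some '-') &&
      (pvMarkers.contains (k.take i) || pvMarkers.contains (k.drop (i + 1))))) := by
  rw [Bool.eq_iff_iff]
  simp only [List.any_eq_true, List.mem_range, Bool.or_eq_true, Bool.and_eq_true,
    beq_iff_eq, PySem.Chars.endswith_iff, PySem.Chars.startswith_iff, List.contains_eq_mem,
    decide_eq_true_eq]
  constructor
  · rintro ⟨m, hm, h⟩
    rcases h with ((⟨t, ht⟩ | ⟨t, ht⟩) | ⟨r, hr⟩) | ⟨r, hr⟩
    · -- endswith '_'::m : k = t ++ '_'::m, separator at i = t.length, suffix branch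
      refine ⟨t.length, ?_, ?_, Or.inr ?_⟩ <;> subst ht <;>
        simp [List.drop_append, List.drop_eq_nil_of_le, hm]
    · refine ⟨t.length, ?_, ?_, Or.inr ?_⟩ <;> subst ht <;>
        simp [List.drop_append, List.drop_eq_nil_of_le, hm]
    · -- startswith m++['_'] : k = (m++['_'])++r, separator at i = m.length, prefix branch
      refine ⟨m.length, ?_, ?_, Or.inl ?_⟩ <;> subst hr <;>
        simp [hm]
    · refine ⟨m.length, ?_, ?_, Or.inl ?_⟩ <;> subst hr <;>
        simp [hm]
  · rintro ⟨i, hi, hc, hmem⟩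
    have hdrop : k.drop i = k[i] :: k.drop (i + 1) := List.drop_eq_getElem_cons hi
    have hk : k = k.take i ++ (k[i] :: k.drop (i + 1)) := by
      rw [← hdrop, List.take_append_drop]
    have hci : k[i]? = some k[i] := List.getElem?_eq_getElem hi
    rcases hmem with hpre | hsuf
    · -- prefix k.take i is a marker: k starts with marker ++ [sep]
      refine ⟨k.take i, hpre, ?_⟩
      have hp : (k.take i ++ [k[i]]) <+: k := by
        conv_rhs => rw [hk]
        exact ⟨k.drop (i + 1), by simp⟩
      rcases hc with hc | hc <;> rw [hci] at hc <;> injection hc with hc <;> rw [← hc]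
      · exact Or.inl (Or.inr hp)
      · exact Or.inr hp
    · -- suffix k.drop (i+1) is a marker: k ends with [sep] ++ marker
      refine ⟨k.drop (i + 1), hsuf, ?_⟩
      have hs : (k[i] :: k.drop (i + 1)) <:+ k := by
        rw [← hdrop]; exact List.drop_suffix i k
      rcases hc with hc | hc <;> rw [hci] at hc <;> injection hc with hc <;> rw [← hc]
      · exact Or.inl (Or.inl (Or.inl hs))
      · exact Or.inl (Or.inl (Or.inr hs))

-- ===== VERDICT (by name: the statement is the Claim_ definition above) =====
theorem looks_sensitive_key_py_spec : Claim_equal_looks_sensitive_key_py := by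
  intro key _
  unfold Spec_looks_sensitive_key_py looks_sensitive_key_py looks_sensitive_key_py_alt
  simp only [pv_core]
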